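-- pv_equiv track=rewrite | github.com/yifan1207/PT-IT-Model-Differences | src/poc/exp22_endpoint_deconfounded_gap/metrics.py | stable_top5_entry_layer
-- ===== SOURCE A (Python) =====
-- def stable_top5_entry_layer(top5_ids: list[list[int]], target_id: int | None) -> int | None:
--     """Earliest layer where ``target_id`` enters top-5 and never leaves."""
--
--     if target_id is None:
--         return None
--     n_layers = len(top5_ids)
--     for layer in range(n_layers):
--         if all(target_id in {int(x) for x in row if x is not None} for row in top5_ids[layer:]):
--             return layer
--     return None
-- ===== SOURCE B (Python) =====
-- def stable_top5_entry_layer(top5_ids: list[list[int]], target_id: int | None) -> int | None: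
--     """Earliest layer where ``target_id`` enters top-5 and never leaves.
--
--     Single forward pass: remember the last layer whose top-5 lacks the target;
--     the answer is the next layer, if any layer remains after it.
--     """
--     if target_id is None:
--         return None
--     last_missing = -1
--     for i, row in enumerate(top5_ids):
--         if target_id not in row:
--             last_missing = i
--     entry = last_missing + 1
--     return entry if entry < len(top5_ids) else None
-- ===== Notes on version B (the rewrite author's own statement) =====
-- stated objective: faster
-- what changed: Replaced the quadratic scan (for each candidate layer, re-check that every later layer's top-5 contains the target) by one forward pass that records the last layer missing the target; the answer is that index plus one when it is still a valid layer.
import Mathlib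
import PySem

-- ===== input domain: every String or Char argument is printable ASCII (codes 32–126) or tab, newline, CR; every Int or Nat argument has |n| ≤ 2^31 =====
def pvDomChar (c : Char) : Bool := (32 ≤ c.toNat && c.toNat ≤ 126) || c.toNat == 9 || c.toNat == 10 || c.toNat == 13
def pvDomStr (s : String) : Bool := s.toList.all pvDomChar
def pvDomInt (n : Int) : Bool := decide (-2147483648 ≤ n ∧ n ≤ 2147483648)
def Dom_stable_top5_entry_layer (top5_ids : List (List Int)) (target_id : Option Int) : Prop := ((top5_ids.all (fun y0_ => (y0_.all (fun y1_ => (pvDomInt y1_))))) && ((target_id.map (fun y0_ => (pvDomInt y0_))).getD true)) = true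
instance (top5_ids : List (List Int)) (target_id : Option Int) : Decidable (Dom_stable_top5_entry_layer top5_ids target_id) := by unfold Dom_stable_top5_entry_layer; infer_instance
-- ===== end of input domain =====

-- B replaces A's quadratic "for each layer re-check all later layers" scan by one
-- forward pass remembering the last layer missing the target (objective: faster).

-- ===== PORT A =====
-- `target_id in {int(x) for x in row if x is not None}`: on List Int the rows hold
-- ints only (no None), and int(x) = x, so the set is PySem.Set.ofList row.
def pvARowHas (t : Int) (row : List Int) : Bool :=
  PySem.Set.contains (PySem.Set.ofList row) t

-- the `for layer in range(n_layers)` loop with its early return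
def pvALoop (top5_ids : List (List Int)) (t : Int) : List Int → Option Int
  | [] => none
  | layer :: rest =>
      if (PySem.List.slice top5_ids (some layer) none).all (fun row => pvARowHas t row) then
        some layer
      else pvALoop top5_ids t rest

def stable_top5_entry_layer (top5_ids : List (List Int)) (target_id : Option Int) : Option Int :=
  match target_id with
  | none => none
  | some t =>
      let n_layers : Int := top5_ids.length
      pvALoop top5_ids t (PySem.List.pyRange 0 n_layers 1)

-- ===== PORT B =====
def stable_top5_entry_layer_alt (top5_ids : List (List Int)) (target_id : Option Int) : Option Int :=
  match target_id with
  | none => none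
  | some t =>
      let last_missing : Int :=
        (PySem.List.enumerate top5_ids 0).foldl
          (fun acc p => if t ∈ p.2 then acc else p.1) (-1)
      let entry := last_missing + 1
      if entry < (top5_ids.length : Int) then some entry else none

-- ===== PRECONDITION & SPEC =====
def Spec_stable_top5_entry_layer (top5_ids : List (List Int)) (target_id : Option Int) (out : Option Int) : Prop := out = stable_top5_entry_layer_alt top5_ids target_id
instance (top5_ids : List (List Int)) (target_id : Option Int) (out : Option Int) : Decidable (Spec_stable_top5_entry_layer top5_ids target_id out) := by unfold Spec_stable_top5_entry_layer; infer_instance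

-- ===== CLAIM (what is proved, stated in full; the proofs are below) =====
def Claim_equal_stable_top5_entry_layer : Prop := ∀ (top5_ids : List (List Int)) (target_id : Option Int), Dom_stable_top5_entry_layer top5_ids target_id → Spec_stable_top5_entry_layer top5_ids target_id (stable_top5_entry_layer top5_ids target_id)

-- ===== LEMMAS AND PROOFS =====

def pvFirstGood (t : Int) : List (List Int) → Option Nat
  | [] => none
  | row :: rest =>
      if (row :: rest).all (fun r => r.contains t) then some 0
      else (pvFirstGood t rest).map (· + 1)
def pvLastMiss (t : Int) : List (List Int) → Option Nat
  | [] => none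
  | row :: rest =>
      match pvLastMiss t rest with
      | some m => some (m + 1)
      | none => if row.contains t then none else some 0

theorem pvARowHas_eq (t : Int) (row : List Int) : pvARowHas t row = row.contains t := by
  simp [pvARowHas, pysem]

theorem pvALoop_eq (top5_ids : List (List Int)) (t : Int) (k : Nat) (hk : k ≤ top5_ids.length) :
    pvALoop top5_ids t (PySem.List.pyRange (k : Int) (top5_ids.length : Int) 1)
      = (pvFirstGood t (top5_ids.drop k)).map (fun m => ((k + m : Nat) : Int)) := by
  induction hd : top5_ids.length - k generalizing k with
  | zero =>
    have hk' : k = top5_ids.length := by omega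
    subst hk'
    rw [PySem.List.pyRange_one_eq_nil (by omega)]
    simp [pvALoop, pvFirstGood]
  | succ d ih =>
    have hklt : k < top5_ids.length := by omega
    rw [PySem.List.pyRange_one_cons (by exact_mod_cast hklt)]
    simp only [pvALoop]
    rw [PySem.List.slice_from_natCast]
    rw [List.drop_eq_getElem_cons hklt]
    simp only [pvFirstGood, pvARowHas_eq]
    simp only [List.all_eq_true, List.contains_iff_mem, ← List.drop_eq_getElem_cons hklt]
    by_cases h : ∀ x ∈ top5_ids.drop k, t ∈ x
    · rw [if_pos h, if_pos h]; simp
    · rw [if_neg h, if_neg h]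
      have : ((k:Int) + 1) = ((k+1 : Nat) : Int) := by push_cast; ring
      rw [this, ih (k+1) (by omega) (by omega)]
      cases pvFirstGood t (top5_ids.drop (k+1)) with
      | none => simp
      | some m => simp; ring

theorem pvFold_eq (t : Int) (l : List (List Int)) (s a : Int) :
    (PySem.List.enumerate l s).foldl (fun acc p => if t ∈ p.2 then acc else p.1) a
      = match pvLastMiss t l with
        | none => a
        | some m => s + m := by
  induction l generalizing s a with
  | nil => simp [PySem.List.enumerate_nil, pvLastMiss]
  | cons row rest ih =>
    rw [PySem.List.enumerate_cons]
    simp only [List.foldl_cons, pvLastMiss]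
    rw [ih]
    cases hm : pvLastMiss t rest with
    | some m => simp; ring
    | none =>
      by_cases h : t ∈ row
      · simp [h]
      · simp [h]

theorem pvAll_iff_lastMiss (t : Int) (l : List (List Int)) :
    (l.all (fun r => r.contains t) = true) ↔ pvLastMiss t l = none := by
  induction l with
  | nil => simp [pvLastMiss]
  | cons row rest ih =>
    simp only [List.all_cons, Bool.and_eq_true, pvLastMiss]
    cases hm : pvLastMiss t rest with
    | some m =>
      constructor
      · rintro ⟨-, hr⟩
        rw [ih, hm] at hr; cases hr
      · intro hc; cases hc
    | none =>
      by_cases h : row.contains t = true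
      · constructor
        · intro _; simpa using h
        · intro _; exact ⟨h, ih.mpr hm⟩
      · constructor
        · rintro ⟨hc, -⟩; exact absurd hc h
        · intro hc; rw [if_neg h] at hc; cases hc

theorem pvFirstGood_eq_lastMiss (t : Int) (l : List (List Int)) :
    pvFirstGood t l
      = match pvLastMiss t l with
        | none => if l.isEmpty then none else some 0
        | some m => if m + 1 < l.length then some (m + 1) else none := by
  induction l with
  | nil => simp [pvFirstGood, pvLastMiss]
  | cons row rest ih =>
    simp only [pvFirstGood]
    by_cases hall : ((row :: rest).all (fun r => r.contains t)) = true
    · rw [if_pos hall, (pvAll_iff_lastMiss t (row :: rest)).mp hall]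
      simp
    · rw [if_neg hall, ih]
      simp only [pvLastMiss]
      cases hm : pvLastMiss t rest with
      | none =>
        have hrow : row.contains t = false := by
          rcases Bool.eq_false_or_eq_true (row.contains t) with h | h
          · exact absurd ((pvAll_iff_lastMiss t (row :: rest)).mpr
              (by simp only [pvLastMiss, hm]; rw [if_pos h])) hall
          · exact h
        simp only [hrow, Bool.false_eq_true, if_false]
        cases rest with
        | nil => simp
        | cons r rs => simp
      | some m =>
        simp only [List.length_cons]
        by_cases hlt : m + 1 < rest.length
        · rw [if_pos hlt, if_pos (by omega)]; simp
        · rw [if_neg hlt, if_neg (by omega)]; simp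

-- ===== VERDICT (by name: the statement is the Claim_ definition above) =====
theorem stable_top5_entry_layer_spec : Claim_equal_stable_top5_entry_layer := by
  intro top5_ids target_id _
  unfold Spec_stable_top5_entry_layer
  cases target_id with
  | none => rfl
  | some t =>
    simp only [stable_top5_entry_layer, stable_top5_entry_layer_alt]
    rw [show (0:Int) = ((0:Nat):Int) from rfl,
        pvALoop_eq top5_ids t 0 (Nat.zero_le _), pvFold_eq, pvFirstGood_eq_lastMiss,
        List.drop_zero]
    cases hm : pvLastMiss t top5_ids with
    | none =>
      cases top5_ids with
      | nil => simp
      | cons r rs => simp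
    | some m =>
      dsimp only
      simp only [Nat.cast_zero, zero_add]
      by_cases hlt : m + 1 < top5_ids.length
      · rw [if_pos hlt, if_pos (by omega)]
        simp
      · rw [if_neg hlt, if_neg (by omega)]
        simp
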